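-- pv_equiv track=rewrite | github.com/dwhitegail/Algorithm_experiment | risk/__init__.py | check_partition
-- ===== SOURCE A (Python) =====
-- def check_partition(random_int, original_partition):
--     """
--     Checks which part of the original partition a random integer falls into.
--
--     Args:
--       random_int: A random integer between 1 and the total length of the expanded partition (inclusive).
--       original_partition: A list representing the partition of the probability space.
--                           Each element in the list represents the size of a segment
--                           in the expanded partition.
--
--     Returns:
--       The index of the original partition the random integer corresponds to.
--       Returns None if the input is outside the valid range.
--     """
--     total_length = sum(original_partition)
--     if not 1 <= random_int <= total_length:
--         return None
--
--     expanded_partition = []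
--     for i, size in enumerate(original_partition):
--         expanded_partition.extend([i] * size)
--
--     return expanded_partition[random_int - 1]
-- ===== SOURCE B (Python) =====
-- def check_partition(random_int, original_partition):
--     # Running cumulative scan over segment sizes instead of materialising the
--     # expanded partition; nonpositive sizes contribute no slots ([i]*size == []).
--     total = sum(original_partition)
--     if not 1 <= random_int <= total:
--         return None
--     k = random_int
--     for i, size in enumerate(original_partition):
--         if size > 0:
--             k -= size
--             if k <= 0:
--                 return i
--     return None
-- ===== Notes on version B (the rewrite author's own statement) =====
-- stated objective: alternative
-- what changed: B replaces A's materialised expanded partition (building a list with one entry per unit of size, then indexing it) by a single running cumulative-sum scan over the segment sizes that subtracts each positive size from the random integer and returns the index where it drops to zero or below.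
import Mathlib
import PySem

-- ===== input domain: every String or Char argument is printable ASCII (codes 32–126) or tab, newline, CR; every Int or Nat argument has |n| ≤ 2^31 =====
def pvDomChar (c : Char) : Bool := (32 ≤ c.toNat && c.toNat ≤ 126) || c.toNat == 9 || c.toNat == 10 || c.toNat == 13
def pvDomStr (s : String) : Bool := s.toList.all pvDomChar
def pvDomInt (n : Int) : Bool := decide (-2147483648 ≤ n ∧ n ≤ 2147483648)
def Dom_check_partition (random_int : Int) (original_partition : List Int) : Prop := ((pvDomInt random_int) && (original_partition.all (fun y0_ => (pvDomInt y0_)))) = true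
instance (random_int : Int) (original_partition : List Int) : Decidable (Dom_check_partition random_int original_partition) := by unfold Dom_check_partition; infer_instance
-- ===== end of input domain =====

-- B replaces A's materialised expanded partition by a running cumulative scan
-- over the segment sizes (objective: alternative; avoids building the expanded list).

-- ===== PORT A =====
def check_partition (random_int : Int) (original_partition : List Int) : Option Int :=
  let total_length := original_partition.sum
  if ¬ (1 ≤ random_int ∧ random_int ≤ total_length) then none
  else
    let expanded_partition :=
      (PySem.List.enumerate original_partition).foldl
        (fun acc p => acc ++ PySem.List.pyRepeat [p.1] p.2) []
    PySem.List.pyGet? expanded_partition (random_int - 1)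

-- ===== PORT B =====
-- B's loop: subtract each positive size from k, return the index where k drops to ≤ 0.
def checkPartitionScan (k : Int) (i : Int) : List Int → Option Int
  | [] => none
  | s :: t =>
    if s > 0 then
      (if k - s ≤ 0 then some i else checkPartitionScan (k - s) (i + 1) t)
    else checkPartitionScan k (i + 1) t

def check_partition_alt (random_int : Int) (original_partition : List Int) : Option Int :=
  let total := original_partition.sum
  if ¬ (1 ≤ random_int ∧ random_int ≤ total) then none
  else checkPartitionScan random_int 0 original_partition

-- ===== PRECONDITION & SPEC =====
def Spec_check_partition (random_int : Int) (original_partition : List Int) (out : Option Int) : Prop := out = check_partition_alt random_int original_partition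
instance (random_int : Int) (original_partition : List Int) (out : Option Int) : Decidable (Spec_check_partition random_int original_partition out) := by unfold Spec_check_partition; infer_instance

-- ===== CLAIM (what is proved, stated in full; the proofs are below) =====
def Claim_equal_check_partition : Prop := ∀ (random_int : Int) (original_partition : List Int), Dom_check_partition random_int original_partition → Spec_check_partition random_int original_partition (check_partition random_int original_partition)

-- ===== LEMMAS AND PROOFS =====

-- positive part of the sum: length of the expanded partition
def posSum (l : List Int) : Int := (l.map (fun s => ((s.toNat : Int)))).sum

theorem sum_le_posSum (l : List Int) : l.sum ≤ posSum l := by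
  induction l with
  | nil => simp [posSum]
  | cons s t ih =>
    simp only [posSum, List.map_cons, List.sum_cons] at *
    have : s ≤ (s.toNat : Int) := Int.self_le_toNat s
    omega

theorem expanded_eq_flatMap (l : List Int) :
    (PySem.List.enumerate l).foldl (fun acc p => acc ++ PySem.List.pyRepeat [p.1] p.2) ([] : List Int)
      = (PySem.List.enumerate l).flatMap (fun p => List.replicate p.2.toNat p.1) := by
  rw [PySem.List.foldl_append_eq_flatMap]
  simp [PySem.List.pyRepeat_singleton]

theorem scan_correct (l : List Int) : ∀ (k i : Int), 1 ≤ k → k ≤ posSum l →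
    PySem.List.pyGet? ((PySem.List.enumerate l i).flatMap (fun p => List.replicate p.2.toNat p.1)) (k - 1)
      = checkPartitionScan k i l := by
  induction l with
  | nil => intro k i h1 h2; simp [posSum] at h2; omega
  | cons s t ih =>
    intro k i h1 h2
    have hps : posSum (s :: t) = (s.toNat : Int) + posSum t := by
      simp [posSum]
    rw [PySem.List.enumerate_cons]
    simp only [List.flatMap_cons, checkPartitionScan]
    by_cases hs : s > 0
    · by_cases hk : k - s ≤ 0
      · -- index falls inside the replicate block
        have hidx : (k - 1).toNat < s.toNat := by omega
        rw [PySem.List.pyGet?_of_nonneg _ (by omega)]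
        rw [List.getElem?_append_left (by simpa using hidx)]
        simp only [hs, if_true, hk, List.getElem?_replicate]
        rw [if_pos (by omega)]
      · -- index lies past the replicate block
        have h2' : k - s ≤ posSum t := by omega
        have := ih (k - s) (i + 1) (by omega) h2'
        rw [PySem.List.pyGet?_of_nonneg _ (by omega)]
        rw [List.getElem?_append_right (by simp; omega)]
        rw [PySem.List.pyGet?_of_nonneg _ (by omega)] at this
        simp only [List.length_replicate]
        have harg : (k - 1).toNat - s.toNat = (k - s - 1).toNat := by omega
        rw [harg]
        simp only [hs, if_true, hk]
        exact this
    · -- nonpositive size: empty block, skip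
      have hz : s.toNat = 0 := by omega
      have h2' : k ≤ posSum t := by omega
      have := ih k (i + 1) h1 h2'
      simp [hz, hs, this]

-- ===== VERDICT (by name: the statement is the Claim_ definition above) =====
theorem check_partition_spec : Claim_equal_check_partition := by
  intro r l _
  unfold Spec_check_partition check_partition check_partition_alt
  by_cases h : 1 ≤ r ∧ r ≤ l.sum
  · simp only [h]
    rw [expanded_eq_flatMap]
    exact scan_correct l r 0 h.1 (le_trans h.2 (sum_le_posSum l))
  · simp only [h, not_false_eq_true, if_true]
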